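-- pv_equiv track=rewrite | github.com/7huukdlnkjkjba/PhantomCrawler | src/modules/parsing/html_parser.py | filter_links_by_pattern
-- ===== SOURCE A (Python) =====
-- from typing import List, Dict, Optional
--
-- def filter_links_by_pattern(links: List[str], include_patterns: Optional[List[str]] = None,
--                           exclude_patterns: Optional[List[str]] = None) -> List[str]:
--     """
--     根据模式过滤链接
--
--     Args:
--         links: 链接列表
--         include_patterns: 包含的模式列表
--         exclude_patterns: 排除的模式列表
--
--     Returns:
--         过滤后的链接列表
--     """
--     filtered_links = links.copy()
--
--     # 应用包含模式
--     if include_patterns: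
--         filtered_links = [link for link in filtered_links
--                         if any(pattern in link for pattern in include_patterns)]
--
--     # 应用排除模式
--     if exclude_patterns:
--         filtered_links = [link for link in filtered_links
--                         if not any(pattern in link for pattern in exclude_patterns)]
--
--     return filtered_links
-- ===== SOURCE B (Python) =====
-- def filter_links_by_pattern(links, include_patterns=None, exclude_patterns=None):
--     """Pattern-major sieve: iterate over patterns marking a boolean array over
--     the links (include patterns set marks, exclude patterns clear them), then
--     collect the links whose mark survived. The inner link scan per pattern can
--     stop testing links already marked (include) / already cleared (exclude)."""
--     n = len(links)
--     keep = [True] * n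
--     if include_patterns:
--         keep = [False] * n
--         for pat in include_patterns:
--             for i, link in enumerate(links):
--                 if not keep[i] and pat in link:
--                     keep[i] = True
--     if exclude_patterns:
--         for pat in exclude_patterns:
--             for i, link in enumerate(links):
--                 if keep[i] and pat in link:
--                     keep[i] = False
--     return [link for link, k in zip(links, keep) if k]
-- ===== Notes on version B (the rewrite author's own statement) =====
-- stated objective: alternative
-- what changed: A is link-major (for each link, scan all patterns inside a comprehension, twice); B is pattern-major: it maintains a boolean mark array over the links, each include pattern sets marks, each exclude pattern clears marks, skipping links whose verdict is already fixed, and the survivors are collected at the end.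
import Mathlib
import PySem

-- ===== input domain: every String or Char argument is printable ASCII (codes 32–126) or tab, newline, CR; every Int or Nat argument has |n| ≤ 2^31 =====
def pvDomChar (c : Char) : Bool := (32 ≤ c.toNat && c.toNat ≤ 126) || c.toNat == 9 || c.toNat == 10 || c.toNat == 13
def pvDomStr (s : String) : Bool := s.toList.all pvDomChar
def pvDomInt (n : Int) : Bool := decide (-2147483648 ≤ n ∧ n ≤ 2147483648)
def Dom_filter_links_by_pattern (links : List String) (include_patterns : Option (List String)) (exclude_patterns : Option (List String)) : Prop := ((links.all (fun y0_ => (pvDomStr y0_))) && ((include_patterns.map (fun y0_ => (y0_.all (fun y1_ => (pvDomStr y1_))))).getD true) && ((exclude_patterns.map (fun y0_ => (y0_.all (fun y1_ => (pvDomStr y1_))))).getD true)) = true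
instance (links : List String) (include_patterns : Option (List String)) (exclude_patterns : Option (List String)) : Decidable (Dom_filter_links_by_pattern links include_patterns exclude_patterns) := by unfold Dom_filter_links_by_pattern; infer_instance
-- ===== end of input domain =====

-- B replaces A's link-major double filtering by a pattern-major sieve over a boolean mark array (objective: alternative; return value only).
-- ===== PORT A =====
def filter_links_by_pattern (links : List String) (include_patterns : Option (List String)) (exclude_patterns : Option (List String)) : List String :=
  -- filtered_links = links.copy()
  let filtered := links
  -- if include_patterns: (truthy = some non-empty list)
  let filtered :=
    match include_patterns with
    | some ps => if !ps.isEmpty then filtered.filter (fun link => ps.any (fun pat => PySem.Str.isIn pat link)) else filtered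
    | none => filtered
  -- if exclude_patterns:
  let filtered :=
    match exclude_patterns with
    | some ps => if !ps.isEmpty then filtered.filter (fun link => !ps.any (fun pat => PySem.Str.isIn pat link)) else filtered
    | none => filtered
  filtered

-- ===== PORT B =====
-- inner loop 'for i, link in enumerate(links): if not keep[i] and pat in link: keep[i] = True'
def pvMarkInc (links : List String) (keep : List Bool) (pat : String) : List Bool :=
  List.zipWith (fun m link => if !m && PySem.Str.isIn pat link then true else m) keep links

-- inner loop 'for i, link in enumerate(links): if keep[i] and pat in link: keep[i] = False'
def pvMarkExc (links : List String) (keep : List Bool) (pat : String) : List Bool :=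
  List.zipWith (fun m link => if m && PySem.Str.isIn pat link then false else m) keep links

def filter_links_by_pattern_alt (links : List String) (include_patterns : Option (List String)) (exclude_patterns : Option (List String)) : List String :=
  let n := links.length
  let keep := List.replicate n true
  let keep :=
    match include_patterns with
    | some ps => if !ps.isEmpty then ps.foldl (pvMarkInc links) (List.replicate n false) else keep
    | none => keep
  let keep :=
    match exclude_patterns with
    | some ps => if !ps.isEmpty then ps.foldl (pvMarkExc links) keep else keep
    | none => keep
  -- [link for link, k in zip(links, keep) if k]
  ((links.zip keep).filter (fun lk => lk.2)).map (fun lk => lk.1)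

-- ===== PRECONDITION & SPEC =====
def Spec_filter_links_by_pattern (links : List String) (include_patterns : Option (List String)) (exclude_patterns : Option (List String)) (out : List String) : Prop := out = filter_links_by_pattern_alt links include_patterns exclude_patterns
instance (links : List String) (include_patterns : Option (List String)) (exclude_patterns : Option (List String)) (out : List String) : Decidable (Spec_filter_links_by_pattern links include_patterns exclude_patterns out) := by unfold Spec_filter_links_by_pattern; infer_instance

-- ===== CLAIM (what is proved, stated in full; the proofs are below) =====
def Claim_equal_filter_links_by_pattern : Prop := ∀ (links : List String) (include_patterns : Option (List String)) (exclude_patterns : Option (List String)), Dom_filter_links_by_pattern links include_patterns exclude_patterns → Spec_filter_links_by_pattern links include_patterns exclude_patterns (filter_links_by_pattern links include_patterns exclude_patterns)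

-- ===== LEMMAS AND PROOFS =====
theorem pv_zipWith_map (links : List String) (g : String → Bool) (h : Bool → String → Bool) :
    List.zipWith h (links.map g) links = links.map (fun l => h (g l) l) := by
  induction links with
  | nil => rfl
  | cons x xs ih => simp [ih]

theorem pv_replicate_map (links : List String) (c : Bool) :
    List.replicate links.length c = links.map (fun _ => c) := by
  induction links with
  | nil => rfl
  | cons x xs ih => simpa [List.replicate_succ] using ih

theorem pv_foldInc (links : List String) (ps : List String) (g : String → Bool) :
    ps.foldl (pvMarkInc links) (links.map g)
      = links.map (fun l => g l || ps.any (fun p => PySem.Str.isIn p l)) := by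
  induction ps generalizing g with
  | nil => simp
  | cons p ps ih =>
      have h1 : pvMarkInc links (links.map g) p
          = links.map (fun l => g l || PySem.Str.isIn p l) := by
        unfold pvMarkInc
        rw [pv_zipWith_map]
        apply List.map_congr_left
        intro l _
        cases g l <;> simp
      rw [List.foldl_cons, h1, ih]
      apply List.map_congr_left
      intro l _
      cases g l <;> simp

theorem pv_foldExc (links : List String) (ps : List String) (g : String → Bool) :
    ps.foldl (pvMarkExc links) (links.map g)
      = links.map (fun l => g l && !ps.any (fun p => PySem.Str.isIn p l)) := by
  induction ps generalizing g with
  | nil => simp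
  | cons p ps ih =>
      have h1 : pvMarkExc links (links.map g) p
          = links.map (fun l => g l && !PySem.Str.isIn p l) := by
        unfold pvMarkExc
        rw [pv_zipWith_map]
        apply List.map_congr_left
        intro l _
        cases g l <;> simp
      rw [List.foldl_cons, h1, ih]
      apply List.map_congr_left
      intro l _
      cases g l <;> simp [Bool.not_or]

theorem pv_extract (links : List String) (f : String → Bool) :
    ((links.zip (links.map f)).filter (fun lk => lk.2)).map (fun lk => lk.1)
      = links.filter f := by
  induction links with
  | nil => rfl
  | cons x xs ih =>
      cases hf : f x <;> simp [hf, ih]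

theorem pv_alt_eq_filter (links : List String) (f : String → Bool)
    (keep : List Bool) (hk : keep = links.map f) :
    ((links.zip keep).filter (fun lk => lk.2)).map (fun lk => lk.1) = links.filter f := by
  rw [hk]; exact pv_extract links f

-- ===== VERDICT (by name: the statement is the Claim_ definition above) =====
theorem filter_links_by_pattern_spec : Claim_equal_filter_links_by_pattern := by
  intro links i e _
  unfold Spec_filter_links_by_pattern filter_links_by_pattern filter_links_by_pattern_alt
  have hT := pv_replicate_map links true
  cases i with
  | none =>
      cases e with
      | none =>
          simp only []
          rw [pv_alt_eq_filter links (fun _ => true) _ hT]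
          simp
      | some qs =>
          cases hq : qs.isEmpty with
          | true =>
              simp only [hq, Bool.not_true, Bool.false_eq_true, if_false]
              rw [pv_alt_eq_filter links (fun _ => true) _ hT]
              simp
          | false =>
              simp only [hq, Bool.not_false, if_true]
              rw [pv_alt_eq_filter links
                  (fun l => true && !qs.any (fun p => PySem.Str.isIn p l)) _
                  (by rw [hT]; exact pv_foldExc links qs (fun _ => true))]
              simp
  | some ps =>
      cases hp : ps.isEmpty with
      | true =>
          cases e with
          | none =>
              simp only [hp, Bool.not_true, Bool.false_eq_true, if_false]
              rw [pv_alt_eq_filter links (fun _ => true) _ hT]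
              simp
          | some qs =>
              cases hq : qs.isEmpty with
              | true =>
                  simp only [hp, hq, Bool.not_true, Bool.false_eq_true, if_false]
                  rw [pv_alt_eq_filter links (fun _ => true) _ hT]
                  simp
              | false =>
                  simp only [hp, hq, Bool.not_true, Bool.not_false, Bool.false_eq_true,
                    if_false, if_true]
                  rw [pv_alt_eq_filter links
                      (fun l => true && !qs.any (fun p => PySem.Str.isIn p l)) _
                      (by rw [hT]; exact pv_foldExc links qs (fun _ => true))]
                  simp
      | false =>
          have hinc : ps.foldl (pvMarkInc links) (List.replicate links.length false)
              = links.map (fun l => ps.any (fun p => PySem.Str.isIn p l)) := by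
            rw [pv_replicate_map links false]
            simpa using pv_foldInc links ps (fun _ => false)
          cases e with
          | none =>
              simp only [hp, Bool.not_false, if_true]
              rw [pv_alt_eq_filter links (fun l => ps.any (fun p => PySem.Str.isIn p l)) _ hinc]
          | some qs =>
              cases hq : qs.isEmpty with
              | true =>
                  simp only [hp, hq, Bool.not_true, Bool.not_false, Bool.false_eq_true,
                    if_false, if_true]
                  rw [pv_alt_eq_filter links (fun l => ps.any (fun p => PySem.Str.isIn p l)) _ hinc]
              | false =>
                  simp only [hp, hq, Bool.not_false, if_true]
                  rw [pv_alt_eq_filter links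
                      (fun l => ps.any (fun p => PySem.Str.isIn p l)
                          && !qs.any (fun p => PySem.Str.isIn p l)) _
                      (by rw [hinc]; exact pv_foldExc links qs _)]
                  rw [List.filter_filter]
                  apply List.filter_congr
                  intro l _
                  exact Bool.and_comm _ _
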